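-- pv_equiv track=rewrite | github.com/MegaChie/GFG-Problems | gfg_20th-JUNE-2024.py | InternalCount
-- ===== SOURCE A (Python) =====
-- def InternalCount(p, q, r):
--     """
--     Returns the number of integeral lattice points found inside the triangle
--     """
--     res = 0
--     boundX1, boundX2 = min(p[0], q[0], r[0]), max(p[0], q[0], r[0])
--     boundY1, boundY2 = min(p[1], q[1], r[1]), max(p[1], q[1], r[1])
--
--     for x in range(boundX1, boundX2 + 1):
--         for y in range(boundY1, boundY2 + 1):
--             d1 = (q[0] - p[0]) * (y - p[1]) - (q[1] - p[1]) * (x - p[0])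
--             d2 = (r[0] - q[0]) * (y - q[1]) - (r[1] - q[1]) * (x - q[0])
--             d3 = (p[0] - r[0]) * (y - r[1]) - (p[1] - r[1]) * (x - r[0])
--             if (d1 > 0 and d2 > 0 and d3 > 0) or (d1 < 0 and d2 < 0 and d3 < 0):
--                 res += 1
--     return res
-- ===== SOURCE B (Python) =====
-- def InternalCount(p, q, r):
--     """Column sweep: for each x, count the interior y's of that column in
--     closed form (intersecting the three half-plane constraints, once per
--     orientation sign), instead of testing every (x, y) pair."""
--     ax, ay = p[0], p[1]
--     bx, by = q[0], q[1]
--     cx, cy = r[0], r[1]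
--     x1, x2 = min(ax, bx, cx), max(ax, bx, cx)
--     y1, y2 = min(ay, by, cy), max(ay, by, cy)
--     res = 0
--     for x in range(x1, x2 + 1):
--         for s in (1, -1):
--             lo, hi = y1, y2
--             for ux, uy, vx, vy in ((ax, ay, bx, by), (bx, by, cx, cy), (cx, cy, ax, ay)):
--                 A = s * (vx - ux)
--                 C = s * ((vx - ux) * uy + (vy - uy) * (x - ux))
--                 if A > 0:
--                     lo = max(lo, C // A + 1)
--                 elif A < 0:
--                     hi = min(hi, -(C // -A) - 1)
--                 elif C >= 0:
--                     lo, hi = 0, -1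
--             if lo <= hi:
--                 res += hi - lo + 1
--     return res
-- ===== Notes on version B (the rewrite author's own statement) =====
-- stated objective: faster
-- what changed: Replaced the per-point double loop over the bounding box by a per-column sweep: for each x the interior y's are counted in closed form by clamping the three half-plane constraints (once per orientation sign) with floor divisions, removing the inner loop over y.
-- outside the precondition, e.g. on InternalCount((0,), (4, 0), (0, 4)): A raises IndexError, B raises IndexError
import Mathlib
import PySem

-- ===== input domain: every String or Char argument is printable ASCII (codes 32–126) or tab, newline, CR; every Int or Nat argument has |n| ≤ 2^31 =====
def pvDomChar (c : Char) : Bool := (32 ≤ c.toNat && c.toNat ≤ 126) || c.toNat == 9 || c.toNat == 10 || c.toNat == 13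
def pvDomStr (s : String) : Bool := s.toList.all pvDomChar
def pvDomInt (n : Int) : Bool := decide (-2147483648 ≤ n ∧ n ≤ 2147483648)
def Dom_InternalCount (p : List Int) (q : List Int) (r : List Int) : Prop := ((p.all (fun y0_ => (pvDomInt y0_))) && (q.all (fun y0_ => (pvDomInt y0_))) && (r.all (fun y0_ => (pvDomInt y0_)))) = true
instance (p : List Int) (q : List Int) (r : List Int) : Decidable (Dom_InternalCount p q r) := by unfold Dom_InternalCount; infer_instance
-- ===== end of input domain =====

-- B replaces A's per-point double loop by a per-column closed-form count (clamping three
-- half-plane constraints per orientation sign): O(width) instead of O(width*height).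

-- ===== PORT A =====
def InternalCount (p : List Int) (q : List Int) (r : List Int) : Int :=
  let p0 := PySem.List.pyGetD p 0 0
  let p1 := PySem.List.pyGetD p 1 0
  let q0 := PySem.List.pyGetD q 0 0
  let q1 := PySem.List.pyGetD q 1 0
  let r0 := PySem.List.pyGetD r 0 0
  let r1 := PySem.List.pyGetD r 1 0
  let boundX1 := min (min p0 q0) r0
  let boundX2 := max (max p0 q0) r0
  let boundY1 := min (min p1 q1) r1
  let boundY2 := max (max p1 q1) r1
  (PySem.List.pyRange boundX1 (boundX2 + 1) 1).foldl (fun res x =>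
    (PySem.List.pyRange boundY1 (boundY2 + 1) 1).foldl (fun res y =>
      let d1 := (q0 - p0) * (y - p1) - (q1 - p1) * (x - p0)
      let d2 := (r0 - q0) * (y - q1) - (r1 - q1) * (x - q0)
      let d3 := (p0 - r0) * (y - r1) - (p1 - r1) * (x - r0)
      if (d1 > 0 ∧ d2 > 0 ∧ d3 > 0) ∨ (d1 < 0 ∧ d2 < 0 ∧ d3 < 0) then res + 1 else res)
      res) 0

-- ===== PORT B =====
-- helper `_clamp` of Source B: intersect the current [lo, hi] with {y : A*y > C}
def pvClamp (A C lo hi : Int) : Int × Int :=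
  if A > 0 then (max lo (PySem.Int.floordiv C A + 1), hi)
  else if A < 0 then (lo, min hi (-(PySem.Int.floordiv C (-A)) - 1))
  else if C ≥ 0 then (0, -1)
  else (lo, hi)

def InternalCount_alt (p : List Int) (q : List Int) (r : List Int) : Int :=
  let ax := PySem.List.pyGetD p 0 0
  let ay := PySem.List.pyGetD p 1 0
  let bx := PySem.List.pyGetD q 0 0
  let by_ := PySem.List.pyGetD q 1 0
  let cx := PySem.List.pyGetD r 0 0
  let cy := PySem.List.pyGetD r 1 0
  let x1 := min (min ax bx) cx
  let x2 := max (max ax bx) cx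
  let y1 := min (min ay by_) cy
  let y2 := max (max ay by_) cy
  (PySem.List.pyRange x1 (x2 + 1) 1).foldl (fun res x =>
    ([1, -1] : List Int).foldl (fun res s =>
      let b := ([(ax, ay, bx, by_), (bx, by_, cx, cy), (cx, cy, ax, ay)] :
          List (Int × Int × Int × Int)).foldl
        (fun bn e =>
          pvClamp (s * (e.2.2.1 - e.1))
                  (s * ((e.2.2.1 - e.1) * e.2.1 + (e.2.2.2 - e.2.1) * (x - e.1)))
                  bn.1 bn.2)
        (y1, y2)
      if b.1 ≤ b.2 then res + (b.2 - b.1 + 1) else res) res) 0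

-- ===== PRECONDITION & SPEC =====
-- Pre_: the Python raises IndexError unless each point has at least the two coordinates read.
def Pre_InternalCount (p : List Int) (q : List Int) (r : List Int) : Prop :=
  2 ≤ p.length ∧ 2 ≤ q.length ∧ 2 ≤ r.length
instance (p : List Int) (q : List Int) (r : List Int) : Decidable (Pre_InternalCount p q r) := by unfold Pre_InternalCount; infer_instance

def pvWitness_InternalCount : List Int × List Int × List Int := ([0, 0], [4, 0], [0, 4])

def Spec_InternalCount (p : List Int) (q : List Int) (r : List Int) (out : Int) : Prop := out = InternalCount_alt p q r
instance (p : List Int) (q : List Int) (r : List Int) (out : Int) : Decidable (Spec_InternalCount p q r out) := by unfold Spec_InternalCount; infer_instance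

-- ===== CLAIM (what is proved, stated in full; the proofs are below) =====
def Claim_equal_InternalCount : Prop := ∀ (p : List Int) (q : List Int) (r : List Int), Dom_InternalCount p q r → Pre_InternalCount p q r → Spec_InternalCount p q r (InternalCount p q r)

-- ===== LEMMAS AND PROOFS =====

-- a counting loop `if P y: res += 1` is a countP
theorem pv_foldl_if_count (P : Int → Prop) [DecidablePred P] (l : List Int) (a : Int) :
    l.foldl (fun acc y => if P y then acc + 1 else acc) a
      = a + (l.countP (fun y => decide (P y)) : Int) := by
  induction l generalizing a with
  | nil => simp
  | cons h t ih =>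
      simp only [List.foldl_cons, List.countP_cons, ih]
      by_cases hP : P h <;> simp [hP] <;> push_cast <;> ring

-- countP of a disjunction of pointwise-disjoint predicates splits
theorem pv_countP_or_split (l : List Int) (p q : Int → Bool)
    (h : ∀ x ∈ l, ¬(p x = true ∧ q x = true)) :
    l.countP (fun x => p x || q x) = l.countP p + l.countP q := by
  induction l with
  | nil => simp
  | cons a t ih =>
      have ha := h a (by simp)
      have ht : ∀ x ∈ t, ¬(p x = true ∧ q x = true) := fun x hx => h x (by simp [hx])
      simp only [List.countP_cons, ih ht]
      cases hp : p a <;> cases hq : q a <;> simp_all <;> omega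

-- number of integers of [a, b) lying in [lo, hi], in closed form
theorem pv_countP_interval (lo hi : Int) : ∀ (n : Nat) (a b : Int), b - a = n →
    ((PySem.List.pyRange a b 1).countP (fun y => decide (lo ≤ y ∧ y ≤ hi)) : Int)
      = if max a lo ≤ min (b - 1) hi then min (b - 1) hi - max a lo + 1 else 0 := by
  intro n
  induction n with
  | zero =>
      intro a b hab
      rw [PySem.List.pyRange_one_eq_nil (by omega)]
      simp; omega
  | succ m ih =>
      intro a b hab
      rw [PySem.List.pyRange_one_cons (by omega)]
      simp only [List.countP_cons]
      push_cast
      rw [ih (a + 1) b (by omega)]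
      split_ifs with h1 h2 h3 <;> simp only [decide_eq_true_eq] at * <;> omega

-- the clamp helper computes exactly the intersection with {y : A*y > C}
theorem pvClamp_iff (A C lo hi y : Int) :
    ((pvClamp A C lo hi).1 ≤ y ∧ y ≤ (pvClamp A C lo hi).2) ↔
      (lo ≤ y ∧ y ≤ hi ∧ C < A * y) := by
  unfold pvClamp
  split_ifs with h1 h2 h3
  · have hb : PySem.Int.floordiv C A < y ↔ C < y * A :=
      PySem.Int.floordiv_lt_iff_lt_mul h1
    have hc : y * A = A * y := mul_comm y A
    have hb' : PySem.Int.floordiv C A < y ↔ C < A * y := by rw [hb, hc]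
    simp only []
    omega
  · have h2' : (0 : Int) < -A := by omega
    have hb : PySem.Int.floordiv C (-A) < -y ↔ C < (-y) * (-A) :=
      PySem.Int.floordiv_lt_iff_lt_mul h2'
    have hc : (-y) * (-A) = A * y := by ring
    have hb' : PySem.Int.floordiv C (-A) < -y ↔ C < A * y := by rw [hb, hc]
    simp only []
    omega
  · have hA : A = 0 := by omega
    have hz : A * y = 0 := by rw [hA]; ring
    simp only []
    omega
  · have hA : A = 0 := by omega
    have hz : A * y = 0 := by rw [hA]; ring
    simp only []
    omega

-- the clamp never widens: bounds stay inside [y1, y2] unless already empty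
theorem pvClamp_inv (A C y1 y2 lo hi : Int)
    (h : (y1 ≤ lo ∧ hi ≤ y2) ∨ hi < lo) :
    (y1 ≤ (pvClamp A C lo hi).1 ∧ (pvClamp A C lo hi).2 ≤ y2) ∨
      (pvClamp A C lo hi).2 < (pvClamp A C lo hi).1 := by
  unfold pvClamp
  split_ifs <;> simp only [] <;> omega

-- one column, one orientation sign: the closed-form count equals the brute count
theorem pv_pattern_count (p0 p1 q0 q1 r0 r1 y1 y2 x s : Int) (hy : y1 ≤ y2)
    (b1 b2 b3 : Int × Int)
    (hb1 : b1 = pvClamp (s * (q0 - p0)) (s * ((q0 - p0) * p1 + (q1 - p1) * (x - p0))) y1 y2)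
    (hb2 : b2 = pvClamp (s * (r0 - q0)) (s * ((r0 - q0) * q1 + (r1 - q1) * (x - q0))) b1.1 b1.2)
    (hb3 : b3 = pvClamp (s * (p0 - r0)) (s * ((p0 - r0) * r1 + (p1 - r1) * (x - r0))) b2.1 b2.2) :
    (if b3.1 ≤ b3.2 then b3.2 - b3.1 + 1 else 0 : Int)
      = ((PySem.List.pyRange y1 (y2 + 1) 1).countP (fun y =>
          decide (0 < s * ((q0 - p0) * (y - p1) - (q1 - p1) * (x - p0)) ∧
                  0 < s * ((r0 - q0) * (y - q1) - (r1 - q1) * (x - q0)) ∧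
                  0 < s * ((p0 - r0) * (y - r1) - (p1 - r1) * (x - r0)))) : Int) := by
  have hiff : ∀ y : Int, (b3.1 ≤ y ∧ y ≤ b3.2) ↔
      (y1 ≤ y ∧ y ≤ y2 ∧
        0 < s * ((q0 - p0) * (y - p1) - (q1 - p1) * (x - p0)) ∧
        0 < s * ((r0 - q0) * (y - q1) - (r1 - q1) * (x - q0)) ∧
        0 < s * ((p0 - r0) * (y - r1) - (p1 - r1) * (x - r0))) := by
    intro y
    have e1 : s * ((q0 - p0) * (y - p1) - (q1 - p1) * (x - p0))
        = s * (q0 - p0) * y - s * ((q0 - p0) * p1 + (q1 - p1) * (x - p0)) := by ring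
    have e2 : s * ((r0 - q0) * (y - q1) - (r1 - q1) * (x - q0))
        = s * (r0 - q0) * y - s * ((r0 - q0) * q1 + (r1 - q1) * (x - q0)) := by ring
    have e3 : s * ((p0 - r0) * (y - r1) - (p1 - r1) * (x - r0))
        = s * (p0 - r0) * y - s * ((p0 - r0) * r1 + (p1 - r1) * (x - r0)) := by ring
    have i1 : b1.1 ≤ y ∧ y ≤ b1.2 ↔
        (y1 ≤ y ∧ y ≤ y2 ∧ s * ((q0 - p0) * p1 + (q1 - p1) * (x - p0)) < s * (q0 - p0) * y) := by
      rw [hb1]; exact pvClamp_iff _ _ _ _ _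
    have i2 : b2.1 ≤ y ∧ y ≤ b2.2 ↔
        (b1.1 ≤ y ∧ y ≤ b1.2 ∧ s * ((r0 - q0) * q1 + (r1 - q1) * (x - q0)) < s * (r0 - q0) * y) := by
      rw [hb2]; exact pvClamp_iff _ _ _ _ _
    have i3 : b3.1 ≤ y ∧ y ≤ b3.2 ↔
        (b2.1 ≤ y ∧ y ≤ b2.2 ∧ s * ((p0 - r0) * r1 + (p1 - r1) * (x - r0)) < s * (p0 - r0) * y) := by
      rw [hb3]; exact pvClamp_iff _ _ _ _ _
    constructor
    · intro h
      obtain ⟨h2a, h2b, hc3⟩ := i3.mp h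
      obtain ⟨h1a, h1b, hc2⟩ := i2.mp ⟨h2a, h2b⟩
      obtain ⟨hA, hB, hc1⟩ := i1.mp ⟨h1a, h1b⟩
      exact ⟨hA, hB, by linarith, by linarith, by linarith⟩
    · rintro ⟨hA, hB, hc1, hc2, hc3⟩
      have w1 := i1.mpr ⟨hA, hB, by linarith⟩
      have w2 := i2.mpr ⟨w1.1, w1.2, by linarith⟩
      exact i3.mpr ⟨w2.1, w2.2, by linarith⟩
  have hinv : (y1 ≤ b3.1 ∧ b3.2 ≤ y2) ∨ b3.2 < b3.1 := by
    rw [hb3]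
    apply pvClamp_inv
    rw [hb2]
    apply pvClamp_inv
    rw [hb1]
    apply pvClamp_inv
    exact Or.inl ⟨le_refl _, le_refl _⟩
  have hcong : (PySem.List.pyRange y1 (y2 + 1) 1).countP (fun y =>
          decide (0 < s * ((q0 - p0) * (y - p1) - (q1 - p1) * (x - p0)) ∧
                  0 < s * ((r0 - q0) * (y - q1) - (r1 - q1) * (x - q0)) ∧
                  0 < s * ((p0 - r0) * (y - r1) - (p1 - r1) * (x - r0))))
      = (PySem.List.pyRange y1 (y2 + 1) 1).countP (fun y => decide (b3.1 ≤ y ∧ y ≤ b3.2)) := by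
    apply List.countP_congr
    intro y hy'
    rw [PySem.List.mem_pyRange_one] at hy'
    simp only [decide_eq_true_eq]
    rw [hiff y]
    constructor
    · rintro ⟨h1, h2, h3⟩
      exact ⟨hy'.1, by omega, h1, h2, h3⟩
    · rintro ⟨_, _, h1, h2, h3⟩
      exact ⟨h1, h2, h3⟩
  rw [hcong]
  rw [pv_countP_interval b3.1 b3.2 (y2 + 1 - y1).toNat y1 (y2 + 1) (by omega)]
  omega

-- one whole column: brute inner loop = the two closed-form pattern counts
theorem pv_col (p0 p1 q0 q1 r0 r1 x y1 y2 : Int) (hy : y1 ≤ y2) (res : Int) :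
    (PySem.List.pyRange y1 (y2 + 1) 1).foldl (fun res y =>
      if ((q0 - p0) * (y - p1) - (q1 - p1) * (x - p0) > 0 ∧
          (r0 - q0) * (y - q1) - (r1 - q1) * (x - q0) > 0 ∧
          (p0 - r0) * (y - r1) - (p1 - r1) * (x - r0) > 0) ∨
         ((q0 - p0) * (y - p1) - (q1 - p1) * (x - p0) < 0 ∧
          (r0 - q0) * (y - q1) - (r1 - q1) * (x - q0) < 0 ∧
          (p0 - r0) * (y - r1) - (p1 - r1) * (x - r0) < 0)
      then res + 1 else res) res
    = ([1, -1] : List Int).foldl (fun res s =>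
        let b := ([(p0, p1, q0, q1), (q0, q1, r0, r1), (r0, r1, p0, p1)] :
            List (Int × Int × Int × Int)).foldl
          (fun bn e => pvClamp (s * (e.2.2.1 - e.1))
            (s * ((e.2.2.1 - e.1) * e.2.1 + (e.2.2.2 - e.2.1) * (x - e.1))) bn.1 bn.2) (y1, y2)
        if b.1 ≤ b.2 then res + (b.2 - b.1 + 1) else res) res := by
  rw [pv_foldl_if_count]
  simp only [List.foldl_cons, List.foldl_nil]
  have h1 := pv_pattern_count p0 p1 q0 q1 r0 r1 y1 y2 x 1 hy _ _ _ rfl rfl rfl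
  have h2 := pv_pattern_count p0 p1 q0 q1 r0 r1 y1 y2 x (-1) hy _ _ _ rfl rfl rfl
  have hsplit : (PySem.List.pyRange y1 (y2 + 1) 1).countP (fun y => decide (
        ((q0 - p0) * (y - p1) - (q1 - p1) * (x - p0) > 0 ∧
         (r0 - q0) * (y - q1) - (r1 - q1) * (x - q0) > 0 ∧
         (p0 - r0) * (y - r1) - (p1 - r1) * (x - r0) > 0) ∨
        ((q0 - p0) * (y - p1) - (q1 - p1) * (x - p0) < 0 ∧
         (r0 - q0) * (y - q1) - (r1 - q1) * (x - q0) < 0 ∧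
         (p0 - r0) * (y - r1) - (p1 - r1) * (x - r0) < 0)))
      = (PySem.List.pyRange y1 (y2 + 1) 1).countP (fun y =>
          decide (0 < 1 * ((q0 - p0) * (y - p1) - (q1 - p1) * (x - p0)) ∧
                  0 < 1 * ((r0 - q0) * (y - q1) - (r1 - q1) * (x - q0)) ∧
                  0 < 1 * ((p0 - r0) * (y - r1) - (p1 - r1) * (x - r0))))
        + (PySem.List.pyRange y1 (y2 + 1) 1).countP (fun y =>
          decide (0 < -1 * ((q0 - p0) * (y - p1) - (q1 - p1) * (x - p0)) ∧
                  0 < -1 * ((r0 - q0) * (y - q1) - (r1 - q1) * (x - q0)) ∧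
                  0 < -1 * ((p0 - r0) * (y - r1) - (p1 - r1) * (x - r0)))) := by
    rw [← pv_countP_or_split]
    · apply List.countP_congr
      intro y _
      simp only [Bool.or_eq_true, decide_eq_true_eq, one_mul, neg_one_mul, neg_pos]

    · intro z _ hz
      simp only [decide_eq_true_eq, one_mul, neg_one_mul, neg_pos] at hz
      obtain ⟨⟨a1, _, _⟩, ⟨b1, _, _⟩⟩ := hz
      linarith
  rw [hsplit]
  push_cast
  rw [← h1, ← h2]
  split_ifs <;> ring

theorem pv_main (p q r : List Int) : InternalCount p q r = InternalCount_alt p q r := by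
  simp only [InternalCount, InternalCount_alt]
  apply PySem.List.foldl_congr_mem
  intro res x _
  exact pv_col (PySem.List.pyGetD p 0 0) (PySem.List.pyGetD p 1 0)
    (PySem.List.pyGetD q 0 0) (PySem.List.pyGetD q 1 0)
    (PySem.List.pyGetD r 0 0) (PySem.List.pyGetD r 1 0) x _ _ (by omega) res

-- ===== VERDICT (by name: the statement is the Claim_ definition above) =====
theorem InternalCount_spec : Claim_equal_InternalCount := by
  intro p q r _ _
  unfold Spec_InternalCount
  exact pv_main p q r
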